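-- pv_equiv track=rewrite | github.com/mhammeda/starlizard_coding_questions | starlizard_coding_questions.py | numDuplicates
-- ===== SOURCE A (Python) =====
-- def numDuplicates(name, price, weight):
-- 	lookup = {}
-- 	num_duplicates = 0
-- 	n = len(name)
--
-- 	for i in range(n):
-- 		key_to_consider = name[i] + ","
-- 		key_to_consider = key_to_consider + str(price[i])
-- 		key_to_consider = key_to_consider + ","
-- 		key_to_consider = key_to_consider + str(weight[i])
-- 		if (key_to_consider in lookup):
-- 			num_duplicates = num_duplicates + 1
-- 		else:
-- 			lookup[key_to_consider] = True
--
-- 	return num_duplicates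
-- ===== SOURCE B (Python) =====
-- def numDuplicates(name, price, weight):
-- 	def key(i):
-- 		return name[i] + "," + str(price[i]) + "," + str(weight[i])
-- 	return sum(any(key(j) == key(i) for j in range(i)) for i in range(len(name)))
-- ===== Notes on version B (the rewrite author's own statement) =====
-- stated objective: alternative
-- what changed: Drops A's seen-dict and running counter entirely: B counts, by a brute-force nested scan, the indices i whose comma-joined key equals the key of some earlier index j < i, using no auxiliary data structure.
import Mathlib
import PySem

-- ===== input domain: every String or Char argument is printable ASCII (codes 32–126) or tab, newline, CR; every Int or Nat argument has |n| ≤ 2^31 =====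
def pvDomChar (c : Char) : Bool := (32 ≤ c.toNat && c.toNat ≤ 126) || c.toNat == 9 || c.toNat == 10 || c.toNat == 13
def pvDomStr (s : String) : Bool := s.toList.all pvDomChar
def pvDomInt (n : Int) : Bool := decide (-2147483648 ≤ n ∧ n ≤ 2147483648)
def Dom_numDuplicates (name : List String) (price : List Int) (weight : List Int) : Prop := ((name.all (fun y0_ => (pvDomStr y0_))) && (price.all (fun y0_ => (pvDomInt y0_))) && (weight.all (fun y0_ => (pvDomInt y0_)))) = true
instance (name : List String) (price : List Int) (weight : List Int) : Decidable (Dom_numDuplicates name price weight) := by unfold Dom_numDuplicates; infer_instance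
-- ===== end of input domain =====

-- B drops A's seen-dict and counter: it counts by a brute-force nested scan the indices i
-- whose comma-joined key equals the key of some earlier index j < i (no auxiliary structure).

-- ===== PORT A =====
-- the comma-joined key built at index i (shared shape of both Pythons)
def pvKey (name : List String) (price : List Int) (weight : List Int) (i : Int) : String :=
  PySem.List.pyGetD name i "" ++ "," ++ PySem.Int.toStr (PySem.List.pyGetD price i 0) ++ ","
    ++ PySem.Int.toStr (PySem.List.pyGetD weight i 0)

def numDuplicates (name : List String) (price : List Int) (weight : List Int) : Int :=
  let n : Int := name.length
  let st := (PySem.List.pyRange 0 n 1).foldl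
    (fun (st : PySem.Dict String Bool × Int) i =>
      let key := pvKey name price weight i
      if st.1.contains key then (st.1, st.2 + 1) else (st.1.insert key true, st.2))
    (PySem.Dict.empty, 0)
  st.2

-- ===== PORT B =====
def numDuplicates_alt (name : List String) (price : List Int) (weight : List Int) : Int :=
  ((PySem.List.pyRange 0 (name.length : Int) 1).countP
      (fun i => (PySem.List.pyRange 0 i 1).any
        (fun j => pvKey name price weight j == pvKey name price weight i)) : Int)

-- ===== PRECONDITION & SPEC =====
-- Pre_ excludes exactly the inputs where Python A raises IndexError: price or weight shorter than name.
def Pre_numDuplicates (name : List String) (price : List Int) (weight : List Int) : Prop :=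
  name.length ≤ price.length ∧ name.length ≤ weight.length
instance (name : List String) (price : List Int) (weight : List Int) : Decidable (Pre_numDuplicates name price weight) := by unfold Pre_numDuplicates; infer_instance

def pvWitness_numDuplicates : List String × List Int × List Int :=
  (["a", "b", "a"], [1, 2, 1], [3, 4, 3])

def Spec_numDuplicates (name : List String) (price : List Int) (weight : List Int) (out : Int) : Prop := out = numDuplicates_alt name price weight
instance (name : List String) (price : List Int) (weight : List Int) (out : Int) : Decidable (Spec_numDuplicates name price weight out) := by unfold Spec_numDuplicates; infer_instance

-- ===== CLAIM (what is proved, stated in full; the proofs are below) =====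
def Claim_equal_numDuplicates : Prop := ∀ (name : List String) (price : List Int) (weight : List Int), Dom_numDuplicates name price weight → Pre_numDuplicates name price weight → Spec_numDuplicates name price weight (numDuplicates name price weight)

-- ===== LEMMAS AND PROOFS =====

-- Joint loop invariant: after processing range(n), A's dict contains exactly the keys of the
-- prefix, and A's counter equals B's brute-force count of indices with an earlier equal key.
theorem pvLoop (f : Int → String) (n : ℕ) :
    (∀ k, ((PySem.List.pyRange 0 (n : Int) 1).foldl
        (fun (st : PySem.Dict String Bool × Int) i =>
          let key := f i
          if st.1.contains key then (st.1, st.2 + 1) else (st.1.insert key true, st.2))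
        (PySem.Dict.empty, 0)).1.contains k
      = (PySem.List.pyRange 0 (n : Int) 1).any (fun j => f j == k))
    ∧ ((PySem.List.pyRange 0 (n : Int) 1).foldl
        (fun (st : PySem.Dict String Bool × Int) i =>
          let key := f i
          if st.1.contains key then (st.1, st.2 + 1) else (st.1.insert key true, st.2))
        (PySem.Dict.empty, 0)).2
      = ((PySem.List.pyRange 0 (n : Int) 1).countP
          (fun i => (PySem.List.pyRange 0 i 1).any (fun j => f j == f i)) : Int) := by
  induction n with
  | zero =>
    constructor
    · intro k
      simp [PySem.List.pyRange_one_eq_nil, PySem.Dict.contains_empty]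
    · simp [PySem.List.pyRange_one_eq_nil]
  | succ n ih =>
    obtain ⟨ihc, ihv⟩ := ih
    have hsplit : PySem.List.pyRange 0 ((n + 1 : ℕ) : Int) 1
        = PySem.List.pyRange 0 (n : Int) 1 ++ [(n : Int)] := by
      push_cast
      exact PySem.List.pyRange_one_succ_right (by positivity)
    rw [hsplit]
    simp only [List.foldl_append, List.foldl_cons, List.foldl_nil,
      List.any_append, List.countP_append, List.countP_cons, List.countP_nil]
    set st := (PySem.List.pyRange 0 (n : Int) 1).foldl
        (fun (st : PySem.Dict String Bool × Int) i =>
          let key := f i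
          if st.1.contains key then (st.1, st.2 + 1) else (st.1.insert key true, st.2))
        (PySem.Dict.empty, 0) with hst
    by_cases h : st.1.contains (f (n : Int)) = true
    · have hany : (PySem.List.pyRange 0 (n : Int) 1).any (fun j => f j == f (n : Int)) = true := by
        rw [← ihc]; exact h
      constructor
      · intro k
        simp only [h, if_true]
        rw [ihc k]
        by_cases hk : f (n : Int) = k
        · subst hk
          simp [hany]
        · simp [List.any_cons, List.any_nil]
          intro hfk
          exact absurd hfk hk
      · simp [h, ihv, hany]
    · have hany : (PySem.List.pyRange 0 (n : Int) 1).any (fun j => f j == f (n : Int)) = false := by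
        rw [← ihc]; simpa using h
      constructor
      · intro k
        simp only [h, Bool.false_eq_true, if_false]
        rw [PySem.Dict.contains_insert, ihc k]
        simp only [List.any_cons, List.any_nil, Bool.or_false]
        have hbeq : (k == f (n : Int)) = (f (n : Int) == k) := by
          by_cases hk : k = f (n : Int)
          · subst hk; rfl
          · simp [hk, Ne.symm hk]
        rw [hbeq]
        exact Bool.or_comm _ _
      · simp [h, ihv, hany]

-- ===== VERDICT (by name: the statement is the Claim_ definition above) =====
theorem numDuplicates_spec : Claim_equal_numDuplicates := by
  intro name price weight _ _
  have h := (pvLoop (pvKey name price weight) name.length).2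
  simpa [Spec_numDuplicates, numDuplicates, numDuplicates_alt] using h
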